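-- pv_equiv track=rewrite | github.com/8bitHermitcrab/Baekjoon | 1282-group-the-people-given-the-group-size-they-belong-to/1282-group-the-people-given-the-group-size-they-belong-to.py | groupThePeople
-- ===== SOURCE A (Python) =====
-- from typing import List
--
-- def groupThePeople(groupSizes: List[int]) -> List[List[int]]:
--     ans, group, next_group = [], [], []
--
--     for i, j in enumerate(groupSizes):
--         group.append([j, i])
--     group.sort()
--
--     for length, index in group:
--         next_group.append(index)
--         if len(next_group) == length:
--             ans.append(next_group)
--             next_group = []
--     return ans
-- ===== SOURCE B (Python) =====
-- def groupThePeople(groupSizes):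
--     buckets = {}
--     for i, s in enumerate(groupSizes):
--         buckets.setdefault(s, []).append(i)
--     ans = []
--     buf = []
--     for s in sorted(buckets):
--         for i in buckets[s]:
--             buf.append(i)
--             if len(buf) == s:
--                 ans.append(buf)
--                 buf = []
--     return ans
-- ===== Notes on version B (the rewrite author's own statement) =====
-- stated objective: alternative
-- what changed: Replaces the comparison sort of all n (size, index) pairs by a one-pass dict bucketing of indices per size, then flushes the buckets iterating only the k distinct sizes in sorted order.
import Mathlib
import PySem

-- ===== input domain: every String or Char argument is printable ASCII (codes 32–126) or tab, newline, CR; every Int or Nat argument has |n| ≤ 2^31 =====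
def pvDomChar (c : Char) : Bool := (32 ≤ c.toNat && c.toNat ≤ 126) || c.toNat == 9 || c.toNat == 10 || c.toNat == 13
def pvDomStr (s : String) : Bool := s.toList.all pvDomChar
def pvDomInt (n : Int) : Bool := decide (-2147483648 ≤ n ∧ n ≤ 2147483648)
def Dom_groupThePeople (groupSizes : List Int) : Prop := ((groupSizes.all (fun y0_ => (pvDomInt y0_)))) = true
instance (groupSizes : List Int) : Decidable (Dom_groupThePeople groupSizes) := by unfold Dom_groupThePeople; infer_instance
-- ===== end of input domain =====

-- B buckets indices by group size in one dict pass and flushes per distinct size in sorted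
-- order, instead of sorting all (size, index) pairs (alternative algorithm, same value everywhere).

-- ===== PORT A =====
-- Python's 2-element list [j, i] is ported as the pair (j, i); comparing equal-length
-- 2-element int lists in Python is exactly the lexicographic pair comparison (sorted2).
def groupThePeople (groupSizes : List Int) : List (List Int) :=
  let group := (PySem.List.enumerate groupSizes).foldl (fun acc p => acc ++ [(p.2, p.1)]) []
  let sortedGroup := PySem.List.sorted2 group (fun p => p.1) (fun p => p.2) false
  let r := sortedGroup.foldl
    (fun (st : List (List Int) × List Int) p =>
      let next_group := st.2 ++ [p.2]
      if (next_group.length : Int) = p.1 then (st.1 ++ [next_group], []) else (st.1, next_group))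
    ([], [])
  r.1

-- ===== PORT B =====
-- buckets.setdefault(s, []).append(i) is d.modify s [] (· ++ [i]) (d[s] = d.get(s, []) + [i]).
def groupThePeople_alt (groupSizes : List Int) : List (List Int) :=
  let buckets : PySem.Dict Int (List Int) :=
    (PySem.List.enumerate groupSizes).foldl
      (fun d p => d.modify p.2 [] (fun l => l ++ [p.1])) PySem.Dict.empty
  let r := (PySem.List.sorted buckets.keys (fun s => s) false).foldl
    (fun (st : List (List Int) × List Int) s =>
      (buckets.getD s []).foldl
        (fun (st : List (List Int) × List Int) i =>
          let buf := st.2 ++ [i]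
          if (buf.length : Int) = s then (st.1 ++ [buf], []) else (st.1, buf)) st)
    ([], [])
  r.1

-- ===== PRECONDITION & SPEC =====
def Spec_groupThePeople (groupSizes : List Int) (out : List (List Int)) : Prop := out = groupThePeople_alt groupSizes
instance (groupSizes : List Int) (out : List (List Int)) : Decidable (Spec_groupThePeople groupSizes out) := by unfold Spec_groupThePeople; infer_instance

-- ===== CLAIM (what is proved, stated in full; the proofs are below) =====
def Claim_equal_groupThePeople : Prop := ∀ (groupSizes : List Int), Dom_groupThePeople groupSizes → Spec_groupThePeople groupSizes (groupThePeople groupSizes)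

-- ===== LEMMAS AND PROOFS =====

-- the (size, index) pair list A sorts
def pvPairs (xs : List Int) : List (Int × Int) :=
  (PySem.List.enumerate xs).map (fun p => (p.2, p.1))

-- sorting by two int keys is sorting by the one lexicographic key
theorem pv_sorted2_eq_sorted_lex {α : Type} (xs : List α) (k1 k2 : α → Int) :
    PySem.List.sorted2 xs k1 k2 false
      = PySem.List.sorted xs (fun a => (toLex (k1 a, k2 a) : Lex (Int × Int))) false := by
  rw [PySem.List.sorted_eq_foldl_insertBy]
  show List.foldl (fun acc x => PySem.List.insertBy
      (fun a b => decide (k1 a < k1 b) || (!decide (k1 b < k1 a) && decide (k2 a < k2 b))) x acc) [] xs = _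
  have h : (fun (a b : α) => decide (k1 a < k1 b) || (!decide (k1 b < k1 a) && decide (k2 a < k2 b)))
      = (fun a b => decide ((toLex (k1 a, k2 a) : Lex (Int × Int)) < toLex (k1 b, k2 b))) := by
    funext a b
    rcases lt_trichotomy (k1 a) (k1 b) with h1 | h1 | h1 <;>
      simp [Prod.Lex.lt_iff, h1] <;> omega
  rw [h]

-- a flatMap of key-filters over a nodup covering key list is a permutation of the list
theorem pv_flatMap_filter_perm (S : List Int) (l : List (Int × Int))
    (hnd : S.Nodup) (hcov : ∀ p ∈ l, p.1 ∈ S) :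
    (S.flatMap (fun s => l.filter (fun p => p.1 == s))).Perm l := by
  induction S generalizing l with
  | nil =>
    have : l = [] := by
      cases l with
      | nil => rfl
      | cons a t => exact absurd (hcov a (List.mem_cons_self)) (List.not_mem_nil)
    simp [this]
  | cons s t ih =>
    rw [List.flatMap_cons]
    have hrest : t.flatMap (fun s' => l.filter (fun p => p.1 == s'))
        = t.flatMap (fun s' => (l.filter (fun p => !(p.1 == s))).filter (fun p => p.1 == s')) := by
      apply List.flatMap_congr
      intro s' hs'
      rw [List.filter_filter]
      apply List.filter_congr
      intro p _
      by_cases h : p.1 = s'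
      · have : s' ≠ s := fun he => (List.nodup_cons.mp hnd).1 (he ▸ hs')
        simp [h, this]
      · simp [h]
    rw [hrest]
    have hcov' : ∀ p ∈ l.filter (fun p => !(p.1 == s)), p.1 ∈ t := by
      intro p hp
      rcases List.mem_filter.mp hp with ⟨hpl, hps⟩
      rcases List.mem_cons.mp (hcov p hpl) with h | h
      · simp [h] at hps
      · exact h
    have := ih (l.filter (fun p => !(p.1 == s))) (List.nodup_cons.mp hnd).2 hcov'
    exact (this.append_left _).trans (List.filter_append_perm _ l)

-- indices inside pvPairs are strictly increasing
theorem pv_pairs_snd_lt (xs : List Int) :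
    (pvPairs xs).Pairwise (fun p q => p.2 < q.2) := by
  unfold pvPairs
  rw [List.pairwise_map]
  exact PySem.List.pairwise_lt_enumerate xs 0

theorem pv_mem_pairs_fst (xs : List Int) (p : Int × Int) (hp : p ∈ pvPairs xs) : p.1 ∈ xs := by
  unfold pvPairs at hp
  rcases List.mem_map.mp hp with ⟨q, hq, rfl⟩
  rcases (PySem.List.mem_enumerate_iff xs 0 q).mp hq with ⟨k, hk, rfl⟩
  simpa using List.getElem_mem hk

-- A's sorted pair list is exactly B's buckets laid out in sorted key order
theorem pv_sorted_pairs_eq_flatMap (xs : List Int) :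
    PySem.List.sorted (pvPairs xs) (fun p => (toLex (p.1, p.2) : Lex (Int × Int))) false
      = (PySem.List.sorted (PySem.Set.ofList xs) (fun s => s) false).flatMap
          (fun s => (pvPairs xs).filter (fun p => p.1 == s)) := by
  have hS := PySem.List.sorted_ofList_pairwise_lt (κ := Int) xs
  apply PySem.List.sorted_eq_of_perm_of_pairwise_lt
  · apply pv_flatMap_filter_perm
    · exact hS.imp ne_of_lt
    · intro p hp
      rw [PySem.List.mem_sorted, PySem.Set.mem_ofList]
      exact pv_mem_pairs_fst xs p hp
  · rw [List.pairwise_flatMap]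
    constructor
    · intro s _
      have h1 := (pv_pairs_snd_lt xs).filter (fun p => p.1 == s)
      apply h1.imp_of_mem
      intro p q hp hq hlt
      have hp1 : p.1 = s := by simpa using (List.mem_filter.mp hp).2
      have hq1 : q.1 = s := by simpa using (List.mem_filter.mp hq).2
      rw [Prod.Lex.lt_iff]
      right
      exact ⟨by simp [hp1, hq1], hlt⟩
    · apply hS.imp_of_mem
      intro a b _ _ hab p hp q hq
      have hp1 : p.1 = a := by simpa using (List.mem_filter.mp hp).2
      have hq1 : q.1 = b := by simpa using (List.mem_filter.mp hq).2
      rw [Prod.Lex.lt_iff]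
      left
      simp [hp1, hq1, hab]

-- B's bucket at key s holds exactly the indices of the pairs with size s, in order
theorem pv_buckets_getD (xs : List Int) (s : Int) :
    ((PySem.List.enumerate xs).foldl
      (fun d p => d.modify p.2 [] (fun l => l ++ [p.1]))
      (PySem.Dict.empty : PySem.Dict Int (List Int))).getD s []
    = ((pvPairs xs).filter (fun p => p.1 == s)).map (fun p => p.2) := by
  have h : (PySem.List.enumerate xs).foldl
      (fun d p => d.modify p.2 [] (fun l => l ++ [p.1]))
      (PySem.Dict.empty : PySem.Dict Int (List Int))
    = (pvPairs xs).foldl (fun d q => d.modify q.1 [] (fun l => l ++ [q.2])) PySem.Dict.empty := by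
    unfold pvPairs
    rw [List.foldl_map]
  rw [h, PySem.Dict.getD_foldl_modify_append, PySem.Dict.getD_empty, List.nil_append]

theorem pv_buckets_keys (xs : List Int) :
    ((PySem.List.enumerate xs).foldl
      (fun d p => d.modify p.2 [] (fun l => l ++ [p.1]))
      (PySem.Dict.empty : PySem.Dict Int (List Int))).keys = PySem.Set.ofList xs := by
  rw [PySem.Dict.keys_foldl_modify_key (PySem.List.enumerate xs) (fun p => p.2) []
        (fun _ p => fun l => l ++ [p.1]) PySem.Dict.empty]
  rw [PySem.Dict.keys_empty, PySem.List.map_snd_enumerate]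
  exact PySem.Set.update_empty xs

theorem groupThePeople_eq (xs : List Int) : groupThePeople xs = groupThePeople_alt xs := by
  simp only [groupThePeople, groupThePeople_alt]
  rw [PySem.List.foldl_append_singleton_eq_map, List.nil_append]
  rw [show ((PySem.List.enumerate xs).map fun p => (p.2, p.1)) = pvPairs xs from rfl]
  rw [pv_sorted2_eq_sorted_lex, pv_sorted_pairs_eq_flatMap, pv_buckets_keys]
  rw [List.foldl_flatMap]
  congr 1
  apply PySem.List.foldl_congr_mem
  intro acc s _
  rw [pv_buckets_getD, List.foldl_map]
  apply PySem.List.foldl_congr_mem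
  intro st p hp
  have h1 : p.1 = s := by simpa using (List.mem_filter.mp hp).2
  simp only [h1]

-- ===== VERDICT (by name: the statement is the Claim_ definition above) =====
theorem groupThePeople_spec : Claim_equal_groupThePeople := by
  intro xs _
  exact groupThePeople_eq xs
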